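-- pv_equiv track=rewrite | github.com/chudur-budur/oemo | moeadex/sh/filter_lambda.py | process
-- ===== SOURCE A (Python) =====
-- def process(data_):
--     first_three = data_[0:3]
--     data = data_[3:]
--     data = sorted(data, key = lambda x: x[0])
--     for i in range(0, len(data)):
--         if ((2 * i) + 1) < len(data):
--             data.pop((2 * i) + 1)
--     return first_three + data[1:]
-- ===== SOURCE B (Python) =====
-- def process(data_):
--     s = sorted(data_[3:], key=lambda x: x[0])
--     kept = [x for j, x in enumerate(s) if j % 3 != 1]
--     return data_[:3] + kept[1:]
-- ===== Notes on version B (the rewrite author's own statement) =====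
-- stated objective: simpler
-- what changed: Replaced the loop of shifting in-place list.pop calls with a single enumerate-and-filter pass that keeps exactly the sorted indices j with j % 3 != 1, which is what the pop pattern leaves.
import Mathlib
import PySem

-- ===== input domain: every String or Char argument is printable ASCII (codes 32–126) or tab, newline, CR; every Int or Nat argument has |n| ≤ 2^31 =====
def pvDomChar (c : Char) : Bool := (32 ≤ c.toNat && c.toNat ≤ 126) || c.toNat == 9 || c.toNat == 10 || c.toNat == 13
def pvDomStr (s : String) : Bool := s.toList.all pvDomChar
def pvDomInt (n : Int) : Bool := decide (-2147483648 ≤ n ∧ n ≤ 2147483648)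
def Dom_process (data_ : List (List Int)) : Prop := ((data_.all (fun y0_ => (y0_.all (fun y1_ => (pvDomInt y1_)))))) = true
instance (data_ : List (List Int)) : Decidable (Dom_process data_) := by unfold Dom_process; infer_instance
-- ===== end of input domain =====

-- B replaces A's loop of shifting in-place pops by one filter pass keeping sorted indices j with j % 3 != 1 (objective: simpler).

-- ===== PORT A =====
-- key = lambda x: x[0] is ported as List.headI, exact under Pre_ (every tail list nonempty).
def process (data_ : List (List Int)) : List (List Int) :=
  let first_three := PySem.List.slice data_ (some 0) (some 3)
  let data0 := PySem.List.slice data_ (some 3) none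
  let data1 := PySem.List.sorted data0 (fun x => x.headI) false
  let data2 := (PySem.List.pyRange 0 data1.length 1).foldl
    (fun d i =>
      if 2 * i + 1 < (d.length : Int) then
        ((PySem.List.pop? d (2 * i + 1)).map Prod.snd).getD d
      else d) data1
  first_three ++ PySem.List.slice data2 (some 1) none

-- ===== PORT B =====
-- key = lambda x: x[0] is ported as List.headI, exact under Pre_ (every tail list nonempty).
def process_alt (data_ : List (List Int)) : List (List Int) :=
  let s := PySem.List.sorted (PySem.List.slice data_ (some 3) none) (fun x => x.headI) false
  let kept := (PySem.List.enumerate s 0).filterMap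
    (fun p => if p.1 % 3 ≠ 1 then some p.2 else none)
  PySem.List.slice data_ none (some 3) ++ PySem.List.slice kept (some 1) none

-- ===== PRECONDITION & SPEC =====
-- Pre_ excludes inputs where some list past index 3 is empty: there Python A (and B) raise IndexError on key x[0].
def Pre_process (data_ : List (List Int)) : Prop := ∀ l ∈ data_.drop 3, l ≠ []
instance (data_ : List (List Int)) : Decidable (Pre_process data_) := by unfold Pre_process; infer_instance
def pvWitness_process : List (List Int) := [[1], [9, 2], [3], [7], [5, 0], [4], [6], [8]]

def Spec_process (data_ : List (List Int)) (out : List (List Int)) : Prop := out = process_alt data_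
instance (data_ : List (List Int)) (out : List (List Int)) : Decidable (Spec_process data_ out) := by unfold Spec_process; infer_instance

-- ===== CLAIM =====
def Claim_equal_process : Prop := ∀ (data_ : List (List Int)), Dom_process data_ → Pre_process data_ → Spec_process data_ (process data_)

-- ===== LEMMAS AND PROOFS =====

-- A's loop, indexed by remaining iteration count k and current iteration i, over Nat.
def pvRunk {α : Type} : Nat → Nat → List α → List α
  | 0, _, d => d
  | k + 1, i, d => pvRunk k (i + 1) (if 2 * i + 1 < d.length then d.eraseIdx (2 * i + 1) else d)

-- what survives: indices ≢ 1 (mod 3)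
def pvKeep3 {α : Type} : List α → List α
  | [] => []
  | [a] => [a]
  | [a, _] => [a]
  | a :: _ :: c :: r => a :: c :: pvKeep3 r

lemma pvRunk_of_long {α : Type} (k : Nat) : ∀ (i : Nat) (d : List α), d.length ≤ 2 * i + 1 → pvRunk k i d = d := by
  induction k with
  | zero => intro i d _; rfl
  | succ k ih =>
    intro i d h
    have hn : ¬ (2 * i + 1 < d.length) := by omega
    simp only [pvRunk, if_neg hn]
    exact ih (i + 1) d (by omega)

lemma pvRunk_cons2 {α : Type} (k : Nat) : ∀ (i : Nat) (x y : α) (d : List α),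
    pvRunk k (i + 1) (x :: y :: d) = x :: y :: pvRunk k i d := by
  induction k with
  | zero => intro i x y d; rfl
  | succ k ih =>
    intro i x y d
    simp only [pvRunk, List.length_cons]
    by_cases h : 2 * i + 1 < d.length
    · rw [if_pos (by omega), if_pos h]
      have he : (x :: y :: d).eraseIdx (2 * (i + 1) + 1) = x :: y :: d.eraseIdx (2 * i + 1) := by
        rw [show 2 * (i + 1) + 1 = (2 * i + 1) + 2 by omega]
        rfl
      rw [he, ih]
    · rw [if_neg (by omega), if_neg h, ih]

lemma pvRunk_keep3 {α : Type} (k : Nat) : ∀ (l : List α), l.length ≤ 3 * k + 1 → pvRunk k 0 l = pvKeep3 l := by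
  induction k with
  | zero =>
    intro l h
    match l with
    | [] => rfl
    | [a] => rfl
    | a :: b :: t => simp at h
  | succ k ih =>
    intro l h
    match l with
    | [] => rw [pvRunk_of_long (k + 1) 0 [] (by simp)]; rfl
    | [a] => rw [pvRunk_of_long (k + 1) 0 [a] (by simp)]; rfl
    | [a, b] =>
      simp only [pvRunk, List.length_cons, List.length_nil]
      rw [if_pos (by omega)]
      simp only [List.eraseIdx]
      rw [pvRunk_of_long k 1 [a] (by simp)]
      rfl
    | a :: b :: c :: r =>
      simp only [pvRunk, List.length_cons]
      rw [if_pos (by omega)]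
      have he : (a :: b :: c :: r).eraseIdx (2 * 0 + 1) = a :: c :: r := by simp [List.eraseIdx]
      rw [he, pvRunk_cons2, ih r (by simp only [List.length_cons] at h; omega)]
      rfl

-- bridge: A's foldl over pyRange equals pvRunk
lemma pvFoldl_eq_runk {α : Type} (k : Nat) : ∀ (i : Nat) (d : List α),
    (PySem.List.pyRange (i : Int) ((i : Int) + (k : Int)) 1).foldl
      (fun d j =>
        if 2 * j + 1 < (d.length : Int) then
          ((PySem.List.pop? d (2 * j + 1)).map Prod.snd).getD d
        else d) d = pvRunk k i d := by
  induction k with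
  | zero =>
    intro i d
    rw [PySem.List.pyRange_one_eq_nil (by omega)]
    rfl
  | succ k ih =>
    intro i d
    rw [PySem.List.pyRange_one_cons (by omega)]
    simp only [List.foldl_cons]
    have ha : (i : Int) + 1 = ((i + 1 : Nat) : Int) := by push_cast; ring
    have hb : (i : Int) + ((k + 1 : Nat) : Int) = ((i + 1 : Nat) : Int) + (k : Int) := by push_cast; ring
    rw [hb, ha, ih (i + 1)]
    show pvRunk k (i + 1) _ = pvRunk (k + 1) i d
    simp only [pvRunk]
    congr 1
    by_cases h : 2 * i + 1 < d.length
    · rw [if_pos (by omega), if_pos h]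
      rw [show (2 * (i : Int) + 1) = ((2 * i + 1 : Nat) : Int) by push_cast; ring]
      rw [PySem.List.pop?_natCast d (2 * i + 1) h]
      rfl
    · rw [if_neg (by omega), if_neg h]

-- B's enumerate-filter equals pvKeep3
lemma pvEnumFilter_keep3 {α : Type} (l : List α) : ∀ (s : Int), s % 3 = 0 →
    (PySem.List.enumerate l s).filterMap (fun p => if p.1 % 3 ≠ 1 then some p.2 else none) = pvKeep3 l := by
  induction l using pvKeep3.induct with
  | case1 => intro s _; simp [PySem.List.enumerate_nil, pvKeep3]
  | case2 a =>
    intro s hs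
    simp only [PySem.List.enumerate_nil, PySem.List.enumerate_cons, List.filterMap_cons,
      List.filterMap_nil]
    rw [if_pos (by omega)]
    rfl
  | case3 a b =>
    intro s hs
    simp only [PySem.List.enumerate_nil, PySem.List.enumerate_cons, List.filterMap_cons,
      List.filterMap_nil]
    rw [if_pos (by omega), if_neg (by omega)]
    rfl
  | case4 a b c r ih =>
    intro s hs
    simp only [PySem.List.enumerate_cons, List.filterMap_cons]
    rw [if_pos (by omega), if_neg (by omega), if_pos (by omega)]
    rw [show s + 1 + 1 + 1 = s + 3 by ring, ih (s + 3) (by omega)]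
    rfl

-- ===== VERDICT =====
theorem process_spec : Claim_equal_process := by
  intro data_ _ _
  unfold Spec_process process process_alt
  simp only [PySem.List.slice_zero_start]
  set s := PySem.List.sorted (PySem.List.slice data_ (some 3) none) (fun x => x.headI) false with hs
  have hA : (PySem.List.pyRange 0 (s.length : Int) 1).foldl
      (fun d j =>
        if 2 * j + 1 < (d.length : Int) then
          ((PySem.List.pop? d (2 * j + 1)).map Prod.snd).getD d
        else d) s = pvKeep3 s := by
    have h := pvFoldl_eq_runk (α := List Int) s.length 0 s
    simp only [Nat.cast_zero, zero_add] at h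
    rw [h, pvRunk_keep3 s.length s (by omega)]
  have hB := pvEnumFilter_keep3 s 0 (by norm_num)
  rw [hA, hB]
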